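-- pv_equiv track=rewrite | github.com/sublimeS0/advent-of-code | 2024/day15/day15p1.py | shift_boxes
-- ===== SOURCE A (Python) =====
-- def shift_boxes(pos, inst, floor_map):
--     """
--     Recursively move boxes if robot is pushing them
--     :param pos: Position of box to move
--     :param inst: Instruction (direction to move the box)
--     :param floor_map: Current floor map layout
--     :return: Updated floor map (dictionary)
--     """
--     # Get target position
--     if inst == '^':
--         new_pos = (pos[0] - 1, pos[1])
--     elif inst == '>':
--         new_pos = (pos[0], pos[1] + 1)
--     elif inst == 'v':
--         new_pos = (pos[0] + 1, pos[1])
--     else:  # inst == '^'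
--         new_pos = (pos[0], pos[1] - 1)
--
--     # Check if position is valid
--     if new_pos not in floor_map:
--         return floor_map
--
--     if floor_map[new_pos] == '#':
--         return floor_map
--
--     if floor_map[new_pos] == 'O':
--         floor_map = shift_boxes(new_pos, inst, floor_map)
--
--     if floor_map[new_pos] == '.':
--         floor_map[new_pos] = 'O'
--         floor_map[pos] = '.'
--         return floor_map
--
--     return floor_map
-- ===== SOURCE B (Python) =====
-- def shift_boxes(pos, inst, floor_map):
--     """Iterative version: walk the chain of boxes once, then do the two writes.
--     Mutates floor_map in place (same net mutations as the recursive original)."""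
--     dr, dc = {'^': (-1, 0), '>': (0, 1), 'v': (1, 0)}.get(inst, (0, -1))
--     cur = pos
--     while True:
--         new_pos = (cur[0] + dr, cur[1] + dc)
--         cell = floor_map.get(new_pos)
--         if cell == 'O':
--             cur = new_pos
--             continue
--         if cell == '.':
--             floor_map[new_pos] = 'O'
--             floor_map[pos] = '.'
--         return floor_map
-- ===== Notes on version B (the rewrite author's own statement) =====
-- stated objective: simpler
-- what changed: Replaces the linear recursion (with post-recursion re-checks and redundant intermediate writes) by a single iterative walk to the end of the box chain followed by exactly two dict writes; the direction is taken from a small delta table via .get.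
import Mathlib
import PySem

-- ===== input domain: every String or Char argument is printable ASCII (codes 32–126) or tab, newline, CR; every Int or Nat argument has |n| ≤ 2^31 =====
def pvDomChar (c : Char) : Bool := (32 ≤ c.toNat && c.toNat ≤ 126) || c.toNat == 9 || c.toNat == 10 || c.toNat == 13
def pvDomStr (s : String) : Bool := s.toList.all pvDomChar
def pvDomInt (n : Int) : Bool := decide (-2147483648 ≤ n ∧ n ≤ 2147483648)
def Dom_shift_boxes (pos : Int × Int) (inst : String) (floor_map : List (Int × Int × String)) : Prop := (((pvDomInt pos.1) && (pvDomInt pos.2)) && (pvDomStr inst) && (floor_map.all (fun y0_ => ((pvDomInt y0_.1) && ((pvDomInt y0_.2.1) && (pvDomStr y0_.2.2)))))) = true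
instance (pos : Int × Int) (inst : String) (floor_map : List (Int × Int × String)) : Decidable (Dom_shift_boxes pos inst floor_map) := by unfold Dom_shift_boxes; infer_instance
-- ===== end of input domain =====

-- B replaces A's linear recursion by one iterative walk to the chain's end plus exactly two
-- dict writes (objective: simpler). Python A and B both mutate floor_map in place, performing
-- the same net mutations and returning the same dict object; the theorems are about the
-- returned dict (as an insertion-ordered association list with key (row, col)).

-- Shared dict primitives on the flattened association list (key = the Int × Int prefix of the
-- triple; Python-dict semantics: lookup = first match, assignment overwrites the first match
-- in place, a new key appends at the end).
def fmGet? (m : List (Int × Int × String)) (k : Int × Int) : Option String :=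
  match m with
  | [] => none
  | (a, b, v) :: t => if a = k.1 ∧ b = k.2 then some v else fmGet? t k

def fmSet (m : List (Int × Int × String)) (k : Int × Int) (v : String) : List (Int × Int × String) :=
  match m with
  | [] => [(k.1, k.2, v)]
  | (a, b, w) :: t => if a = k.1 ∧ b = k.2 then (a, b, v) :: t else (a, b, w) :: fmSet t k v

-- ===== PORT A =====
-- Literal transliteration of A's recursion; Python's call stack bounded by the number of dict
-- entries + 1 (the chain visits distinct keys of the map), so fuel = length + 1 is never
-- exhausted on real inputs; fuel 0 returns the map unchanged.
def shiftA (fuel : Nat) (pos : Int × Int) (inst : String) (floor_map : List (Int × Int × String)) : List (Int × Int × String) :=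
  match fuel with
  | 0 => floor_map
  | fuel + 1 =>
    let new_pos : Int × Int :=
      if inst = "^" then (pos.1 - 1, pos.2)
      else if inst = ">" then (pos.1, pos.2 + 1)
      else if inst = "v" then (pos.1 + 1, pos.2)
      else (pos.1, pos.2 - 1)
    match fmGet? floor_map new_pos with
    | none => floor_map
    | some c =>
      if c = "#" then floor_map
      else
        let floor_map := if c = "O" then shiftA fuel new_pos inst floor_map else floor_map
        if fmGet? floor_map new_pos = some "." then
          fmSet (fmSet floor_map new_pos "O") pos "."
        else floor_map

def shift_boxes (pos : Int × Int) (inst : String) (floor_map : List (Int × Int × String)) : List (Int × Int × String) :=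
  shiftA (floor_map.length + 1) pos inst floor_map

-- ===== PORT B =====
-- B's while-loop: walk the chain of 'O' cells and report the final '.' cell (none if blocked);
-- same fuel bound as A's recursion depth.
def walkB (fuel : Nat) (cur : Int × Int) (delta : Int × Int) (floor_map : List (Int × Int × String)) : Option (Int × Int) :=
  match fuel with
  | 0 => none
  | fuel + 1 =>
    let new_pos : Int × Int := (cur.1 + delta.1, cur.2 + delta.2)
    match fmGet? floor_map new_pos with
    | some c =>
      if c = "O" then walkB fuel new_pos delta floor_map
      else if c = "." then some new_pos
      else none
    | none => none

def shift_boxes_alt (pos : Int × Int) (inst : String) (floor_map : List (Int × Int × String)) : List (Int × Int × String) :=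
  let delta : Int × Int :=
    if inst = "^" then (-1, 0) else if inst = ">" then (0, 1)
    else if inst = "v" then (1, 0) else (0, -1)
  match walkB (floor_map.length + 1) pos delta floor_map with
  | some e => fmSet (fmSet floor_map e "O") pos "."
  | none => floor_map

-- ===== PRECONDITION & SPEC =====
def Spec_shift_boxes (pos : Int × Int) (inst : String) (floor_map : List (Int × Int × String)) (out : List (Int × Int × String)) : Prop := out = shift_boxes_alt pos inst floor_map
instance (pos : Int × Int) (inst : String) (floor_map : List (Int × Int × String)) (out : List (Int × Int × String)) : Decidable (Spec_shift_boxes pos inst floor_map out) := by unfold Spec_shift_boxes; infer_instance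

-- ===== CLAIM (what is proved, stated in full; the proofs are below) =====
def Claim_equal_shift_boxes : Prop := ∀ (pos : Int × Int) (inst : String) (floor_map : List (Int × Int × String)), Dom_shift_boxes pos inst floor_map → Spec_shift_boxes pos inst floor_map (shift_boxes pos inst floor_map)

-- ===== LEMMAS AND PROOFS =====

theorem fmGet?_fmSet_self (m : List (Int × Int × String)) (k : Int × Int) (v : String) :
    fmGet? (fmSet m k v) k = some v := by
  induction m with
  | nil => simp [fmSet, fmGet?]
  | cons h t ih =>
    obtain ⟨a, b, w⟩ := h
    by_cases hk : a = k.1 ∧ b = k.2 <;> simp [fmSet, fmGet?, hk, ih]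

theorem fmGet?_fmSet_ne (m : List (Int × Int × String)) (k k' : Int × Int) (v : String)
    (h : k ≠ k') : fmGet? (fmSet m k v) k' = fmGet? m k' := by
  have hkk : ¬(k.1 = k'.1 ∧ k.2 = k'.2) := fun hc => h (Prod.ext hc.1 hc.2)
  induction m with
  | nil => simp [fmSet, fmGet?, hkk]
  | cons hd t ih =>
    obtain ⟨a, b, w⟩ := hd
    by_cases hk : a = k.1 ∧ b = k.2
    · simp [fmSet, fmGet?, hk, hkk]
    · have hkk' : ¬(k'.1 = k.1 ∧ k'.2 = k.2) := fun hc => hkk ⟨hc.1.symm, hc.2.symm⟩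
      by_cases hk' : a = k'.1 ∧ b = k'.2 <;> simp [fmSet, fmGet?, hk, hk', hkk', ih]

theorem fmSet_fmSet_self (m : List (Int × Int × String)) (k : Int × Int) (v w : String) :
    fmSet (fmSet m k v) k w = fmSet m k w := by
  induction m with
  | nil => simp [fmSet]
  | cons hd t ih =>
    obtain ⟨a, b, u⟩ := hd
    by_cases hk : a = k.1 ∧ b = k.2 <;> simp [fmSet, hk, ih]

theorem fmSet_eq_of_get (m : List (Int × Int × String)) (k : Int × Int) (v : String)
    (h : fmGet? m k = some v) : fmSet m k v = m := by
  induction m with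
  | nil => simp [fmGet?] at h
  | cons hd t ih =>
    obtain ⟨a, b, u⟩ := hd
    by_cases hk : a = k.1 ∧ b = k.2
    · simp [fmGet?, hk] at h
      simp [fmSet, hk, h]
    · simp [fmGet?, hk] at h
      simp [fmSet, hk, ih h]

theorem walkB_get (fuel : Nat) (cur delta : Int × Int) (m : List (Int × Int × String))
    (e : Int × Int) (h : walkB fuel cur delta m = some e) : fmGet? m e = some "." := by
  induction fuel generalizing cur with
  | zero => simp [walkB] at h
  | succ n ih =>
    simp only [walkB] at h
    cases hg : fmGet? m (cur.1 + delta.1, cur.2 + delta.2) with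
    | none => simp [hg] at h
    | some c =>
      rw [hg] at h
      by_cases hO : c = "O"
      · subst hO
        simp at h
        exact ih _ h
      · by_cases hD : c = "."
        · subst hD
          simp at h
          rw [h] at hg
          exact hg
        · simp [hO, hD] at h

-- A's recursion computes exactly B's "walk then two writes".
theorem shiftA_eq_walk (fuel : Nat) (pos delta : Int × Int) (inst : String)
    (m : List (Int × Int × String))
    (hd : delta = (if inst = "^" then ((-1 : Int), (0 : Int)) else if inst = ">" then (0, 1)
      else if inst = "v" then (1, 0) else (0, -1))) :
    shiftA fuel pos inst m =
      match walkB fuel pos delta m with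
      | some e => fmSet (fmSet m e "O") pos "."
      | none => m := by
  induction fuel generalizing pos with
  | zero => simp [shiftA, walkB]
  | succ n ih =>
    have hnp : (if inst = "^" then (pos.1 - 1, pos.2)
        else if inst = ">" then (pos.1, pos.2 + 1)
        else if inst = "v" then (pos.1 + 1, pos.2)
        else (pos.1, pos.2 - 1)) = ((pos.1 + delta.1, pos.2 + delta.2) : Int × Int) := by
      subst hd
      by_cases h1 : inst = "^" <;> by_cases h2 : inst = ">" <;> by_cases h3 : inst = "v" <;>
        simp [h1, h2, h3] <;> omega
    simp only [shiftA, walkB, hnp]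
    set np : Int × Int := (pos.1 + delta.1, pos.2 + delta.2) with hnpdef
    cases hg : fmGet? m np with
    | none => simp
    | some c =>
      by_cases hH : c = "#"
      · subst hH; simp
      · by_cases hO : c = "O"
        · subst hO
          rw [ih np]
          cases hw : walkB n np delta m with
          | none => simp [hg]
          | some e =>
            have he : fmGet? m e = some "." := walkB_get n np delta m e hw
            have hene : e ≠ np := by
              intro hq; rw [hq, hg] at he; simp at he
            have h1 : fmGet? (fmSet (fmSet m e "O") np ".") np = some "." :=
              fmGet?_fmSet_self _ _ _
            have h2 : fmGet? (fmSet m e "O") np = some "O" := by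
              rw [fmGet?_fmSet_ne m e np "O" hene]; exact hg
            simp [h1, fmSet_fmSet_self, fmSet_eq_of_get _ _ _ h2]
        · by_cases hD : c = "."
          · subst hD; simp [hg]
          · simp [hg, hH, hO, hD]

-- ===== VERDICT (by name: the statement is the Claim_ definition above) =====
theorem shift_boxes_spec : Claim_equal_shift_boxes := by
  intro pos inst floor_map _
  unfold Spec_shift_boxes shift_boxes shift_boxes_alt
  exact shiftA_eq_walk (floor_map.length + 1) pos _ inst floor_map rfl
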